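-- pv_equiv track=rewrite | github.com/KristoferGauti/Forritun-1-HR | projects/population.py | get_min_state_index
-- ===== SOURCE A (Python) =====
-- def get_min_max_int_population_list(states, pop):
--    """Returns the population's minimum and maximum value
--    It also returns the integer population list"""
--    int_pop_list = []
--
--    for num in pop:
--       int_pop = int(num)
--       int_pop_list.append(int_pop)
--
--    min_pop = min(int_pop_list)
--    max_pop = max(int_pop_list)
--
--    return min_pop, max_pop, int_pop_list
--
-- def get_min_state_index(states, pop):
--    """Gets the minimum population value index"""
--    min_num, max_num, int_pop_list = get_min_max_int_population_list(states,pop)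
--    min_list = []
--    max_list = []
--
--    for min_index, population in enumerate(int_pop_list):
--       if population == min_num:
--          min_list.append(min_index)
--
--    for max_index, population in enumerate(int_pop_list):
--       if population == max_num:
--          max_list.append(max_index)
--
--    return min_list[0], max_list[0], min_num, max_num
-- ===== SOURCE B (Python) =====
-- def get_min_state_index(states, pop):
--     """Gets the minimum population value index (single fused pass)."""
--     if not pop:
--         raise ValueError("min() arg is an empty sequence")
--     first = int(pop[0])
--     min_v, min_i = first, 0
--     max_v, max_i = first, 0
--     for i, num in enumerate(pop[1:], 1):
--         v = int(num)
--         if v < min_v: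
--             min_v, min_i = v, i
--         if v > max_v:
--             max_v, max_i = v, i
--     return min_i, max_i, min_v, max_v
-- ===== Notes on version B (the rewrite author's own statement) =====
-- stated objective: alternative
-- what changed: Replaces A's four passes (build int list, min, max, two enumerate-and-filter index scans) with one fused loop that tracks the running min/max together with their first indices.
import Mathlib
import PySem

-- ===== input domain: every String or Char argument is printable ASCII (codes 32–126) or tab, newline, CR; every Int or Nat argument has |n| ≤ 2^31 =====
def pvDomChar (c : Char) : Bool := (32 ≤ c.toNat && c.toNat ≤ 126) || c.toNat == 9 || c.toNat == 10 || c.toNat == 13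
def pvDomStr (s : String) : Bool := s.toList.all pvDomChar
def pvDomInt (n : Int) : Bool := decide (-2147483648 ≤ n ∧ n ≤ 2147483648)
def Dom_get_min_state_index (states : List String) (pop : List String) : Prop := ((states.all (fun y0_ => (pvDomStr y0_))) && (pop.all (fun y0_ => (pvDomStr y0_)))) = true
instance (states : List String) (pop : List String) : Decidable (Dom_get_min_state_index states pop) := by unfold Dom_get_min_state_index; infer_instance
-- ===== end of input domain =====

-- B fuses A's four passes into ONE loop tracking the running min/max with their first indices.
-- shared helper: int(num); 0 is an arbitrary default used only outside Pre_ (Pre_ guarantees the parse succeeds)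
def pvToInt (s : String) : Int := (PySem.Int.ofStr? s).getD 0

-- ===== PORT A =====
def get_min_state_index (states : List String) (pop : List String) : Int × Int × Int × Int :=
  -- get_min_max_int_population_list: build the int list, then min and max of it
  let int_pop_list : List Int := pop.foldl (fun acc num => acc ++ [pvToInt num]) []
  let min_num : Int := ((PySem.List.min? int_pop_list (fun x => x)).getD 0)
  let max_num : Int := ((PySem.List.max? int_pop_list (fun x => x)).getD 0)
  -- the two enumerate-and-filter passes
  let min_list : List Int := (PySem.List.enumerate int_pop_list).foldl
    (fun acc p => if p.2 == min_num then acc ++ [p.1] else acc) []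
  let max_list : List Int := (PySem.List.enumerate int_pop_list).foldl
    (fun acc p => if p.2 == max_num then acc ++ [p.1] else acc) []
  -- min_list[0], max_list[0] (IndexError impossible under Pre_; 0 default outside)
  ((PySem.List.pyGet? min_list 0).getD 0, (PySem.List.pyGet? max_list 0).getD 0, min_num, max_num)

-- ===== PORT B =====
-- loop body of Source B: state (min_v, min_i, max_v, max_i), one enumerated element (i, num)
def pvAltStep (st : Int × Int × Int × Int) (p : Int × String) : Int × Int × Int × Int :=
  let v := pvToInt p.2
  let mn := if v < st.1 then (v, p.1) else (st.1, st.2.1)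
  let mx := if v > st.2.2.1 then (v, p.1) else (st.2.2.1, st.2.2.2)
  (mn.1, mn.2, mx.1, mx.2)

def get_min_state_index_alt (states : List String) (pop : List String) : Int × Int × Int × Int :=
  match pop with
  | [] => (0, 0, 0, 0)   -- Source B raises ValueError here; outside Pre_
  | h :: t =>
    let first := pvToInt h
    let r := (PySem.List.enumerate t 1).foldl pvAltStep (first, 0, first, 0)
    (r.2.1, r.2.2.2, r.1, r.2.2.1)

-- ===== PRECONDITION & SPEC =====
-- Pre_ excludes exactly the inputs where the Python A raises (ValueError): empty pop
-- (min([]) in A) and pop entries that int() rejects; B raises on the same inputs.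
def Pre_get_min_state_index (states : List String) (pop : List String) : Prop :=
  pop ≠ [] ∧ pop.all (fun s => (PySem.Int.ofStr? s).isSome)
instance (states : List String) (pop : List String) : Decidable (Pre_get_min_state_index states pop) := by unfold Pre_get_min_state_index; infer_instance

def pvWitness_get_min_state_index : List String × List String :=
  (["a", "b", "c"], ["5", "2", "9"])

def Spec_get_min_state_index (states : List String) (pop : List String) (out : Int × Int × Int × Int) : Prop := out = get_min_state_index_alt states pop
instance (states : List String) (pop : List String) (out : Int × Int × Int × Int) : Decidable (Spec_get_min_state_index states pop out) := by unfold Spec_get_min_state_index; infer_instance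

-- ===== CLAIM (what is proved, stated in full; the proofs are below) =====
def Claim_equal_get_min_state_index : Prop := ∀ (states : List String) (pop : List String), Dom_get_min_state_index states pop → Pre_get_min_state_index states pop → Spec_get_min_state_index states pop (get_min_state_index states pop)

-- ===== LEMMAS AND PROOFS =====

-- A-side: first index collected by an enumerate-and-filter pass is idxOf
lemma filter_enumerate_head (xs : List Int) (c : Int) (s : Int) (hc : c ∈ xs) :
    (((PySem.List.enumerate xs s).filter (fun p => p.2 == c)).map Prod.fst).head? =
      some (s + (xs.idxOf c : Int)) := by
  induction xs generalizing s with
  | nil => cases hc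
  | cons x t ih =>
    rw [PySem.List.enumerate_cons]
    by_cases hx : x = c
    · subst hx
      simp [List.idxOf_cons_self]
    · have hct : c ∈ t := by
        rcases List.mem_cons.mp hc with h | h
        · exact absurd h.symm hx
        · exact h
      have hbe : (x == c) = false := by simp [hx]
      simp only [List.filter_cons, List.idxOf_cons, hbe, cond_false, Bool.false_eq_true,
        if_false]
      rw [ih (s + 1) hct]
      congr 1
      push_cast
      ring

-- enumerate commutes with map on the values
lemma enumerate_map {α β : Type} (g : α → β) (l : List α) (s : Int) :
    PySem.List.enumerate (l.map g) s = (PySem.List.enumerate l s).map (fun p => (p.1, g p.2)) := by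
  induction l generalizing s with
  | nil => simp [PySem.List.enumerate_nil]
  | cons x t ih => simp [PySem.List.enumerate_cons, ih]

-- the integer version of the fused loop body
def pvIStep (st : Int × Int × Int × Int) (p : Int × Int) : Int × Int × Int × Int :=
  let mn := if p.2 < st.1 then (p.2, p.1) else (st.1, st.2.1)
  let mx := if p.2 > st.2.2.1 then (p.2, p.1) else (st.2.2.1, st.2.2.2)
  (mn.1, mn.2, mx.1, mx.2)

lemma altStep_eq_istep (t : List String) (s : Int) (st : Int × Int × Int × Int) :
    (PySem.List.enumerate t s).foldl pvAltStep st =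
      (PySem.List.enumerate (t.map pvToInt) s).foldl pvIStep st := by
  rw [enumerate_map, List.foldl_map]
  rfl

lemma istep_one (mnv mni mxv mxi s x : Int) :
    pvIStep (mnv, mni, mxv, mxi) (s, x) =
      (min mnv x, if x < mnv then s else mni, max mxv x, if mxv < x then s else mxi) := by
  simp only [pvIStep]
  by_cases h1 : x < mnv <;> by_cases h2 : mxv < x <;>
    simp [h1, h2, Prod.ext_iff] <;> omega

-- invariant of the fused loop: running min/max with first-improvement indices
lemma istep_invariant (t : List Int) (mnv mni mxv mxi s : Int) :
    (PySem.List.enumerate t s).foldl pvIStep (mnv, mni, mxv, mxi) =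
      (t.foldl min mnv,
       (if t.foldl min mnv < mnv then s + (t.idxOf (t.foldl min mnv) : Int) else mni),
       t.foldl max mxv,
       (if mxv < t.foldl max mxv then s + (t.idxOf (t.foldl max mxv) : Int) else mxi)) := by
  induction t generalizing mnv mni mxv mxi s with
  | nil => simp [PySem.List.enumerate_nil]
  | cons x r ih =>
    rw [PySem.List.enumerate_cons, List.foldl_cons, istep_one, ih, List.foldl_cons, List.foldl_cons]
    have hmn := (PySem.List.foldl_min_le r (min mnv x)).1
    have hmx := (PySem.List.le_foldl_max r (max mxv x)).1
    refine Prod.ext rfl (Prod.ext ?_ (Prod.ext rfl ?_))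
    · -- min index component
      by_cases h1 : x < mnv
      · rw [min_eq_right (le_of_lt h1)] at hmn ⊢
        by_cases h2 : r.foldl min x < x
        · have hne : (x == r.foldl min x) = false := by simp; omega
          simp only [List.idxOf_cons, hne, cond_false]
          rw [if_pos h2, if_pos (lt_trans h2 h1)]
          push_cast; ring
        · have heq : r.foldl min x = x := le_antisymm hmn (not_lt.mp h2)
          rw [heq, if_neg (lt_irrefl x), List.idxOf_cons_self]
          simp [h1]
      · rw [min_eq_left (not_lt.mp h1)] at hmn ⊢
        by_cases h2 : r.foldl min mnv < mnv
        · have hne : (x == r.foldl min mnv) = false := by simp; omega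
          simp only [List.idxOf_cons, hne, cond_false]
          rw [if_pos h2, if_pos h2]
          push_cast; ring
        · rw [if_neg h2, if_neg h2, if_neg h1]
    · -- max index component
      by_cases h1 : mxv < x
      · rw [max_eq_right (le_of_lt h1)] at hmx ⊢
        by_cases h2 : x < r.foldl max x
        · have hne : (x == r.foldl max x) = false := by simp; omega
          simp only [List.idxOf_cons, hne, cond_false]
          rw [if_pos h2, if_pos (lt_trans h1 h2)]
          push_cast; ring
        · have heq : r.foldl max x = x := le_antisymm (not_lt.mp h2) hmx
          rw [heq, if_neg (lt_irrefl x), List.idxOf_cons_self]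
          simp [h1]
      · rw [max_eq_left (not_lt.mp h1)] at hmx ⊢
        by_cases h2 : mxv < r.foldl max mxv
        · have hne : (x == r.foldl max mxv) = false := by simp; omega
          simp only [List.idxOf_cons, hne, cond_false]
          rw [if_pos h2, if_pos h2]
          push_cast; ring
        · rw [if_neg h2, if_neg h2, if_neg h1]

-- A's append-if loop is filter+map (proved directly; shape of 'if p: out.append(i)')
lemma foldl_filter_idx (l : List (Int × Int)) (c : Int) (acc : List Int) :
    l.foldl (fun acc p => if p.2 == c then acc ++ [p.1] else acc) acc =
      acc ++ (l.filter (fun p => p.2 == c)).map Prod.fst := by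
  induction l generalizing acc with
  | nil => simp
  | cons y t ih =>
    rw [List.foldl_cons, List.filter_cons]
    by_cases h : (y.2 == c) = true
    · rw [if_pos h, ih, h]
      simp
    · rw [if_neg h, ih]
      simp [h]

-- head of a filtered index list, read through pyGet? 0
lemma pyGetD_zero_of_head? (l : List Int) (a : Int) (h : l.head? = some a) :
    (PySem.List.pyGet? l 0).getD 0 = a := by
  cases l with
  | nil => simp at h
  | cons y t =>
    simp only [List.head?_cons, Option.some.injEq] at h
    subst h
    simp [PySem.List.pyGet?, PySem.List.pyIdx?]

-- ===== VERDICT (by name: the statement is the Claim_ definition above) =====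
theorem get_min_state_index_spec : Claim_equal_get_min_state_index := by
  intro states pop _hdom hpre
  obtain ⟨hne, _hall⟩ := hpre
  cases pop with
  | nil => exact absurd rfl hne
  | cons h t =>
    show _ = _
    simp only [get_min_state_index, get_min_state_index_alt,
      PySem.List.foldl_append_singleton_eq_map, List.nil_append, List.map_cons]
    set x := pvToInt h with hx
    set r := t.map pvToInt with hr
    rw [PySem.List.min?_id_cons, PySem.List.max?_id_cons, Option.getD_some, Option.getD_some]
    set mn := r.foldl min x with hmn
    set mx := r.foldl max x with hmx
    have hmn_le : mn ≤ x := (PySem.List.foldl_min_le r x).1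
    have hmx_ge : x ≤ mx := (PySem.List.le_foldl_max r x).1
    have hmn_mem : mn ∈ x :: r := by
      rcases PySem.List.foldl_min_mem r x with h | h
      · rw [hmn, h]; exact List.mem_cons_self
      · exact List.mem_cons_of_mem _ h
    have hmx_mem : mx ∈ x :: r := by
      rcases PySem.List.foldl_max_mem r x with h | h
      · rw [hmx, h]; exact List.mem_cons_self
      · exact List.mem_cons_of_mem _ h
    -- A's two filter passes give the first index of mn / mx
    rw [foldl_filter_idx (PySem.List.enumerate (x :: r)) mn [],
        foldl_filter_idx (PySem.List.enumerate (x :: r)) mx []]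
    rw [pyGetD_zero_of_head? _ _ (by rw [List.nil_append]; exact filter_enumerate_head (x :: r) mn 0 hmn_mem),
        pyGetD_zero_of_head? _ _ (by rw [List.nil_append]; exact filter_enumerate_head (x :: r) mx 0 hmx_mem)]
    -- B's fused loop
    rw [altStep_eq_istep, ← hr, istep_invariant, ← hmn, ← hmx]
    simp only [zero_add]
    refine Prod.ext ?_ (Prod.ext ?_ rfl)
    · by_cases h1 : mn < x
      · have hne' : (x == mn) = false := by simp; omega
        simp only [List.idxOf_cons, hne', cond_false, if_pos h1]
        push_cast; ring
      · have heq : mn = x := le_antisymm hmn_le (not_lt.mp h1)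
        rw [heq, List.idxOf_cons_self, if_neg (lt_irrefl x)]
        simp
    · by_cases h1 : x < mx
      · have hne' : (x == mx) = false := by simp; omega
        simp only [List.idxOf_cons, hne', cond_false, if_pos h1]
        push_cast; ring
      · have heq : mx = x := le_antisymm (not_lt.mp h1) hmx_ge
        rw [heq, List.idxOf_cons_self, if_neg (lt_irrefl x)]
        simp
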